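-- pv_equiv track=rewrite | github.com/proompteng/lab | skills/huly-api/scripts/huly-api.py | normalize_token_key
-- ===== SOURCE A (Python) =====
-- def normalize_token_key(value: str) -> str:
--     parts: list[str] = []
--     for char in value.strip():
--         if char.isalnum():
--             parts.append(char.upper())
--         else:
--             parts.append('_')
--     normalized = ''.join(parts).strip('_')
--     while '__' in normalized:
--         normalized = normalized.replace('__', '_')
--     return normalized
-- ===== SOURCE B (Python) =====
-- def normalize_token_key(value: str) -> str:
--     mapped = ''.join(c.upper() if c.isalnum() else '_' for c in value.strip())
--     return '_'.join(filter(None, mapped.split('_')))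
-- ===== Notes on version B (the rewrite author's own statement) =====
-- stated objective: simpler
-- what changed: A strips underscores off the ends and then repeatedly replaces double underscores by single ones until none remain; B instead splits the mapped string at underscores, drops the empty tokens and rejoins the survivors, which trims and collapses in one pass.
import Mathlib
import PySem

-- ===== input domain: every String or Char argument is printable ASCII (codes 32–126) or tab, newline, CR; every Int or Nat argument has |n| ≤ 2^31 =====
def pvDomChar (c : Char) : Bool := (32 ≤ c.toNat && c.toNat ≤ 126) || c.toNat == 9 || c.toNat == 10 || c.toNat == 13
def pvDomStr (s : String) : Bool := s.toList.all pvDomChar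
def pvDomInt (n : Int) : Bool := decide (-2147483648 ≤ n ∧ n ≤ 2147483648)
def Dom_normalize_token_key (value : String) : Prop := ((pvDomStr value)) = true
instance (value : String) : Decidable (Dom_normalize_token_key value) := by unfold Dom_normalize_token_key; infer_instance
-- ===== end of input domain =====

-- B replaces A's strip('_') plus repeated "__"→"_" replace-until-fixpoint loop by one split-on-'_' /
-- drop-empty-tokens / join pass over the mapped string (objective: simpler).

-- ===== PORT A =====
-- pvRep1 is a recursive specification of `s.replace('__','_')`, needed only to justify
-- termination of A's while-loop (each replace strictly shortens a string containing "__").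
def pvRep1 : List Char → List Char
  | [] => []
  | [c] => [c]
  | c :: d :: u => if c = '_' ∧ d = '_' then '_' :: pvRep1 u else c :: pvRep1 (d :: u)

theorem pvReplaceGo_spec (fuel : Nat) (l acc : List Char) (h : l.length ≤ fuel) :
    PySem.Chars.replace.go ['_', '_'] ['_'] fuel l acc = acc.reverse ++ pvRep1 l := by
  induction fuel generalizing l acc with
  | zero =>
    have : l = [] := by cases l <;> simp_all
    subst this; simp [PySem.Chars.replace.go, pvRep1]
  | succ n ih =>
    match l with
    | [] => simp [PySem.Chars.replace.go, pvRep1]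
    | [c] =>
      have hpre : (['_', '_'].isPrefixOf [c]) = false := by
        simp [List.isPrefixOf]
      simp only [PySem.Chars.replace.go, hpre, Bool.false_eq_true, if_false]
      rw [ih [] (c :: acc) (by simp)]
      simp [pvRep1]
    | c :: d :: u =>
      simp only [List.length_cons] at h
      by_cases hcd : c = '_' ∧ d = '_'
      · obtain ⟨hc, hd⟩ := hcd; subst hc; subst hd
        have hpre : (['_', '_'].isPrefixOf ('_' :: '_' :: u)) = true := by
          simp [List.isPrefixOf]
        simp only [PySem.Chars.replace.go, hpre, if_true, List.length_cons, List.length_nil,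
          List.drop_succ_cons, List.drop_zero, List.reverse_cons, List.reverse_nil,
          List.nil_append, List.singleton_append]
        rw [ih u ('_' :: acc) (by omega)]
        simp [pvRep1]
      · have hpre : (['_', '_'].isPrefixOf (c :: d :: u)) = false := by
          rw [Bool.eq_false_iff]
          intro hx
          rw [List.isPrefixOf_iff_prefix] at hx
          rcases hx with ⟨t, ht⟩
          apply hcd
          cases ht
          exact ⟨rfl, rfl⟩
        simp only [PySem.Chars.replace.go, hpre, Bool.false_eq_true, if_false]
        rw [ih (d :: u) (c :: acc) (by simp only [List.length_cons]; omega)]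
        have : pvRep1 (c :: d :: u) = c :: pvRep1 (d :: u) := by
          simp [pvRep1, hcd]
        simp [this]

theorem pvReplace_eq (s : List Char) :
    PySem.Chars.replace s ['_', '_'] ['_'] = pvRep1 s := by
  simp only [PySem.Chars.replace, List.isEmpty_cons, Bool.false_eq_true, if_false]
  rw [pvReplaceGo_spec s.length s [] le_rfl]
  simp

theorem pvRep1_length_le (s : List Char) : (pvRep1 s).length ≤ s.length := by
  induction s using pvRep1.induct with
  | case1 => simp [pvRep1]
  | case2 c => simp [pvRep1]
  | case3 c d u h ih => simp only [pvRep1, if_pos h, List.length_cons]; omega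
  | case4 c d u h ih => simp only [pvRep1, if_neg h, List.length_cons]; simp at ih; omega

theorem pvRep1_length_lt (s : List Char) (h : ['_', '_'] <:+: s) :
    (pvRep1 s).length < s.length := by
  induction s using pvRep1.induct with
  | case1 => simp at h
  | case2 c =>
    exfalso
    rcases h with ⟨p, q, hpq⟩
    have := congrArg List.length hpq
    simp at this; omega
  | case3 c d u hcd ih =>
    have := pvRep1_length_le u
    simp only [pvRep1, if_pos hcd, List.length_cons]; omega
  | case4 c d u hcd ih =>
    rw [List.infix_cons_iff] at h
    rcases h with h | h
    · exfalso
      rcases h with ⟨t, ht⟩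
      apply hcd
      cases ht
      exact ⟨rfl, rfl⟩
    · have := ih h
      simp only [pvRep1, if_neg hcd, List.length_cons]
      simp at this ⊢; omega

-- while '__' in normalized: normalized = normalized.replace('__', '_')
def pvLoopA (s : List Char) : List Char :=
  if PySem.Chars.isIn ['_', '_'] s then pvLoopA (PySem.Chars.replace s ['_', '_'] ['_']) else s
termination_by s.length
decreasing_by
  rw [pvReplace_eq]
  exact pvRep1_length_lt s ((PySem.Chars.isIn_iff_infix _ _).mp (by assumption))

def normalize_token_key (value : String) : String :=
  -- parts = []; for char in value.strip(): parts.append(char.upper() if alnum else '_')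
  let parts : List String :=
    ((PySem.Str.strip value).toList).foldl
      (fun acc c =>
        acc ++ [if PySem.Chars.isalnum c then String.ofList [PySem.Chars.upperChar c] else "_"]) []
  -- normalized = ''.join(parts).strip('_')
  let normalized : String := PySem.Str.stripChars (PySem.Str.join "" parts) "_"
  -- while '__' in normalized: normalized = normalized.replace('__', '_')
  String.ofList (pvLoopA normalized.toList)

-- ===== PORT B =====
def normalize_token_key_alt (value : String) : String :=
  -- mapped = ''.join(c.upper() if c.isalnum() else '_' for c in value.strip())
  let mapped : List Char :=
    ((PySem.Str.strip value).toList).map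
      (fun c => if PySem.Chars.isalnum c then PySem.Chars.upperChar c else '_')
  -- return '_'.join(filter(None, mapped.split('_')))
  String.ofList
    (PySem.Chars.join ['_'] ((PySem.Chars.splitOn mapped ['_']).filter (fun t => !t.isEmpty)))

-- ===== PRECONDITION & SPEC =====
def Spec_normalize_token_key (value : String) (out : String) : Prop := out = normalize_token_key_alt value
instance (value : String) (out : String) : Decidable (Spec_normalize_token_key value out) := by unfold Spec_normalize_token_key; infer_instance

-- ===== CLAIM (what is proved, stated in full; the proofs are below) =====
def Claim_equal_normalize_token_key : Prop := ∀ (value : String), Dom_normalize_token_key value → Spec_normalize_token_key value (normalize_token_key value)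

-- ===== LEMMAS AND PROOFS =====

-- pvCollapse: the fixpoint of repeated "__" → "_" replacement (each run of '_' becomes one '_').
def pvCollapse : List Char → List Char
  | [] => []
  | [c] => [c]
  | c :: d :: u => if c = '_' ∧ d = '_' then pvCollapse (d :: u) else c :: pvCollapse (d :: u)

-- pvSplit: recursive specification of s.split('_').
def pvSplit : List Char → List (List Char)
  | [] => [[]]
  | c :: t =>
    if c = '_' then [] :: pvSplit t
    else (c :: (pvSplit t).headI) :: (pvSplit t).tail

-- pvJ: '_'.join(filter(None, s.split('_'))), B's phase 2, as the common normal form.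
def pvJ (s : List Char) : List Char :=
  PySem.Chars.join ['_'] ((pvSplit s).filter (fun t => !t.isEmpty))

theorem pvSplit_ne_nil (s : List Char) : pvSplit s ≠ [] := by
  cases s with
  | nil => simp [pvSplit]
  | cons c t => by_cases h : c = '_' <;> simp [pvSplit, h]

theorem pvSplitGo_spec (fuel : Nat) (l cur : List Char) (acc : List (List Char))
    (h : l.length + 1 ≤ fuel) :
    PySem.Chars.splitOn.go ['_'] fuel l cur acc =
      acc.reverse ++ (cur.reverse ++ (pvSplit l).headI) :: (pvSplit l).tail := by
  induction fuel generalizing l cur acc with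
  | zero => omega
  | succ n ih =>
    match l with
    | [] => simp [PySem.Chars.splitOn.go, pvSplit]
    | c :: t =>
      simp only [List.length_cons] at h
      by_cases hc : c = '_'
      · subst hc
        have hpre : (['_'].isPrefixOf ('_' :: t)) = true := by
          simp [List.isPrefixOf]
        simp only [PySem.Chars.splitOn.go, hpre, if_true, List.length_cons, List.length_nil,
          List.drop_succ_cons, List.drop_zero]
        rw [ih t [] (cur.reverse :: acc) (by omega)]
        cases hps : pvSplit t with
        | nil => exact absurd hps (pvSplit_ne_nil t)
        | cons a l => simp [pvSplit, hps]
      · have hpre : (['_'].isPrefixOf (c :: t)) = false := by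
          rw [Bool.eq_false_iff]
          intro hx
          rw [List.isPrefixOf_iff_prefix] at hx
          rcases hx with ⟨q, hq⟩
          cases hq
          exact hc rfl
        simp only [PySem.Chars.splitOn.go, hpre, Bool.false_eq_true, if_false]
        rw [ih t (c :: cur) acc (by omega)]
        simp [pvSplit, hc]

theorem pvSplitOn_eq (s : List Char) : PySem.Chars.splitOn s ['_'] = pvSplit s := by
  unfold PySem.Chars.splitOn
  rw [pvSplitGo_spec (s.length + 1) s [] [] le_rfl]
  cases hps : pvSplit s with
  | nil => exact absurd hps (pvSplit_ne_nil s)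
  | cons a l => simp

theorem pvRep1_head? (s : List Char) : (pvRep1 s).head? = s.head? := by
  induction s using pvRep1.induct with
  | case1 => rfl
  | case2 c => rfl
  | case3 c d u h ih => rcases h with ⟨h1, h2⟩; subst h1; simp [pvRep1, h2]
  | case4 c d u h ih => simp [pvRep1, h]

theorem pvCollapse_cons_ne (c : Char) (a : List Char) (hc : c ≠ '_') :
    pvCollapse (c :: a) = c :: pvCollapse a := by
  cases a with
  | nil => rfl
  | cons d u => rw [pvCollapse, if_neg (fun h => hc h.1)]

theorem pvCollapse_cons_underscore (a : List Char) :
    pvCollapse ('_' :: a) = if a.head? = some '_' then pvCollapse a else '_' :: pvCollapse a := by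
  cases a with
  | nil => simp [pvCollapse]
  | cons d u =>
    by_cases hd : d = '_'
    · subst hd; simp [pvCollapse]
    · rw [pvCollapse, if_neg (fun h => hd h.2)]
      simp [hd]

theorem pvCollapse_rep1 (s : List Char) : pvCollapse (pvRep1 s) = pvCollapse s := by
  induction s using pvRep1.induct with
  | case1 => rfl
  | case2 c => rfl
  | case3 c d u h ih =>
    rcases h with ⟨h1, h2⟩; subst h1; subst h2
    have h1 : pvRep1 ('_' :: '_' :: u) = '_' :: pvRep1 u := by simp [pvRep1]
    have lhs2 : pvCollapse ('_' :: '_' :: u) = pvCollapse ('_' :: u) := by simp [pvCollapse]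
    rw [h1, pvCollapse_cons_underscore (pvRep1 u), pvRep1_head?, lhs2,
      pvCollapse_cons_underscore u]
    split_ifs <;> rw [ih]
  | case4 c d u h ih =>
    simp only [pvRep1, if_neg h]
    by_cases hc : c = '_'
    · subst hc
      have hd : d ≠ '_' := fun hd => h ⟨rfl, hd⟩
      rw [pvCollapse_cons_underscore (pvRep1 (d :: u)), pvRep1_head?,
        pvCollapse_cons_underscore (d :: u)]
      simp only [List.head?_cons]
      rw [if_neg (by simpa using hd), if_neg (by simpa using hd), ih]
    · rw [pvCollapse_cons_ne c _ hc, pvCollapse_cons_ne c _ hc, ih]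

theorem pvCollapse_of_not_infix (s : List Char) (h : ¬ ['_', '_'] <:+: s) :
    pvCollapse s = s := by
  induction s using pvCollapse.induct with
  | case1 => rfl
  | case2 c => rfl
  | case3 c d u hcd ih =>
    exfalso
    rcases hcd with ⟨h1, h2⟩; subst h1; subst h2
    exact h ⟨[], u, rfl⟩
  | case4 c d u hcd ih =>
    rw [pvCollapse, if_neg hcd, ih]
    intro hx
    exact h (hx.trans (List.suffix_cons c (d :: u)).isInfix)

theorem pvLoopA_eq_collapse (s : List Char) : pvLoopA s = pvCollapse s := by
  induction s using pvLoopA.induct with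
  | case1 s hin ih =>
    rw [pvLoopA, if_pos hin, ih, pvReplace_eq, pvCollapse_rep1]
  | case2 s hin =>
    rw [pvLoopA, if_neg hin]
    rw [Bool.not_eq_true] at hin
    exact (pvCollapse_of_not_infix s ((PySem.Chars.isIn_eq_false_iff _ _).mp hin)).symm

theorem pvSplit_append_underscore (y : List Char) :
    pvSplit (y ++ ['_']) = pvSplit y ++ [[]] := by
  induction y with
  | nil => simp [pvSplit]
  | cons c t ih =>
    by_cases hc : c = '_'
    · simp [pvSplit, hc, ih]
    · have h1 : (pvSplit t ++ [[]]).headI = (pvSplit t).headI := by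
        cases h : pvSplit t with
        | nil => exact absurd h (pvSplit_ne_nil t)
        | cons a l => simp
      have h2 : (pvSplit t ++ [[]]).tail = (pvSplit t).tail ++ [[]] := by
        cases h : pvSplit t with
        | nil => exact absurd h (pvSplit_ne_nil t)
        | cons a l => simp
      simp [pvSplit, hc, ih, h1, h2]

theorem pvGetLast?_cons (c : Char) (t : List Char) (ht : t ≠ []) :
    (c :: t).getLast? = t.getLast? := by
  cases t with
  | nil => exact absurd rfl ht
  | cons d u => exact List.getLast?_cons_cons

theorem pvFilter_ne_nil (y : List Char) (hne : y ≠ []) (hl : y.getLast? ≠ some '_') :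
    (pvSplit y).filter (fun t => !t.isEmpty) ≠ [] := by
  induction y with
  | nil => exact absurd rfl hne
  | cons c t ih =>
    by_cases hc : c = '_'
    · subst hc
      have ht : t ≠ [] := by
        rintro rfl
        exact hl rfl
      have hlt : t.getLast? ≠ some '_' := by
        rwa [pvGetLast?_cons _ _ ht] at hl
      simpa [pvSplit] using ih ht hlt
    · simp [pvSplit, hc, List.filter_cons]

theorem pvCollapse_eq_J (x : List Char) (hl : x.getLast? ≠ some '_') :
    pvCollapse x = (if x.head? = some '_' then ['_'] else []) ++ pvJ x := by
  induction x using pvCollapse.induct with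
  | case1 => simp [pvCollapse, pvJ, pvSplit, PySem.Chars.join_nil]
  | case2 c =>
    have hc : c ≠ '_' := by simpa using hl
    simp [pvCollapse, pvJ, pvSplit, hc, List.filter_cons, PySem.Chars.join_singleton]
  | case3 c d u hcd ih =>
    rcases hcd with ⟨h1, h2⟩; subst h1; subst h2
    have hl' : ('_' :: u).getLast? ≠ some '_' := by
      rwa [List.getLast?_cons_cons] at hl
    rw [pvCollapse, if_pos ⟨rfl, rfl⟩, ih hl']
    have hJ : pvJ ('_' :: '_' :: u) = pvJ ('_' :: u) := by
      simp [pvJ, pvSplit]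
    simp [hJ]
  | case4 c d u hcd ih =>
    have hl' : (d :: u).getLast? ≠ some '_' := by
      rwa [List.getLast?_cons_cons] at hl
    rw [pvCollapse, if_neg hcd]
    rw [ih hl']
    by_cases hc : c = '_'
    · subst hc
      have hd : d ≠ '_' := fun hd => hcd ⟨rfl, hd⟩
      have hJ : pvJ ('_' :: d :: u) = pvJ (d :: u) := by
        unfold pvJ
        rw [show pvSplit ('_' :: d :: u) = [] :: pvSplit (d :: u) from by simp [pvSplit]]
        rw [List.filter_cons]
        simp
      simp only [List.head?_cons]
      rw [if_neg (show ¬ (some d = some '_') by simpa using hd)]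
      simp [hJ]
    · simp only [List.head?_cons]
      rw [if_neg (show ¬ (some c = some '_') by simpa using hc)]
      by_cases hd : d = '_'
      · subst hd
        -- x = c :: '_' :: u with c ≠ '_' and u ≠ [] not ending in '_'
        have hu : u ≠ [] := by
          rintro rfl
          exact hl' rfl
        have hlu : u.getLast? ≠ some '_' := by
          rwa [pvGetLast?_cons _ _ hu] at hl'
        have hF := pvFilter_ne_nil u hu hlu
        have hJu : pvJ ('_' :: u) = pvJ u := by
          unfold pvJ
          rw [show pvSplit ('_' :: u) = [] :: pvSplit u from by simp [pvSplit]]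
          rw [List.filter_cons]
          simp
        have hsplit : pvSplit (c :: '_' :: u) = [c] :: pvSplit u := by
          simp [pvSplit, hc]
        have hJc : pvJ (c :: '_' :: u) =
            c :: '_' :: PySem.Chars.join ['_'] ((pvSplit u).filter (fun t => !t.isEmpty)) := by
          unfold pvJ
          rw [hsplit, List.filter_cons]
          simp only [List.isEmpty_cons, Bool.not_false, if_true]
          cases hFc : (pvSplit u).filter (fun t => !t.isEmpty) with
          | nil => exact absurd hFc hF
          | cons a l => rw [PySem.Chars.join_cons_cons]; simp
        simp only [hJu, hJc]
        simp [pvJ]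
      · -- d ≠ '_': head token of d :: u is nonempty, c joins it
        rw [if_neg (show ¬ (some d = some '_') by simpa using hd)]
        have hsplitd : pvSplit (d :: u) = (d :: (pvSplit u).headI) :: (pvSplit u).tail := by
          simp [pvSplit, hd]
        have hsplitc : pvSplit (c :: d :: u) =
            (c :: d :: (pvSplit u).headI) :: (pvSplit u).tail := by
          simp [pvSplit, hc, hd]
        unfold pvJ
        rw [hsplitc, hsplitd, List.filter_cons, List.filter_cons]
        simp only [List.isEmpty_cons, Bool.not_false, if_true, List.nil_append]
        cases hFc : (pvSplit u).tail.filter (fun t => !t.isEmpty) with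
        | nil => simp [PySem.Chars.join_singleton]
        | cons a l => rw [PySem.Chars.join_cons_cons, PySem.Chars.join_cons_cons]; simp

theorem pvJ_dropWhile (s : List Char) (p : Char → Bool) (hp : ∀ c, p c = true ↔ c = '_') :
    pvJ (List.dropWhile p s) = pvJ s := by
  induction s with
  | nil => rfl
  | cons c t ih =>
    by_cases hc : c = '_'
    · subst hc
      rw [List.dropWhile_cons_of_pos ((hp '_').mpr rfl), ih]
      simp [pvJ, pvSplit]
    · rw [List.dropWhile_cons_of_neg (by simp [hp, hc])]

theorem pvHead_dropWhile (s : List Char) (p : Char → Bool) (hp : ∀ c, p c = true ↔ c = '_') :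
    (List.dropWhile p s).head? ≠ some '_' := by
  intro hx
  have h := List.head?_dropWhile_not p s
  rw [hx] at h
  simp only at h
  rw [(hp '_').mpr rfl] at h
  exact absurd h (by simp)

theorem pvHead?_dropLast (y : List Char) (hh : y.head? ≠ some '_') :
    y.dropLast.head? ≠ some '_' := by
  cases y with
  | nil => simpa using hh
  | cons a t =>
    cases t with
    | nil => simp
    | cons b u => simpa [List.dropLast] using hh

theorem pvJ_append_underscore (y : List Char) : pvJ (y ++ ['_']) = pvJ y := by
  unfold pvJ
  rw [pvSplit_append_underscore, List.filter_append]
  simp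

theorem pvRstrip_eq (n : Nat) (y : List Char) (hn : y.length ≤ n) (p : Char → Bool)
    (hp : ∀ c, p c = true ↔ c = '_') (hh : y.head? ≠ some '_') :
    pvCollapse ((List.dropWhile p y.reverse).reverse) = pvJ y := by
  induction n generalizing y with
  | zero =>
    have : y = [] := by cases y <;> simp_all
    subst this
    simp [pvJ, pvSplit, pvCollapse, PySem.Chars.join_nil]
  | succ n ih =>
    by_cases hl : y.getLast? = some '_'
    · have hy0 : y ≠ [] := by rintro rfl; simp at hl
      have hlast : y.getLast hy0 = '_' := by
        have := List.getLast?_eq_getLast (l := y) hy0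
        rw [this] at hl
        exact Option.some.inj hl
      have hy : y.dropLast ++ ['_'] = y := by
        rw [← hlast]; exact List.dropLast_append_getLast hy0
      have hrev : y.reverse = '_' :: y.dropLast.reverse := by
        rw [← hy]; simp
      rw [hrev, List.dropWhile_cons_of_pos ((hp '_').mpr rfl)]
      have hlen : y.dropLast.length ≤ n := by
        have h2 := congrArg List.length hy
        simp only [List.length_append, List.length_cons, List.length_nil] at h2
        omega
      rw [ih y.dropLast hlen (pvHead?_dropLast y hh)]
      conv_rhs => rw [← hy]
      rw [pvJ_append_underscore]
    · cases hrev : y.reverse with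
      | nil =>
        have : y = [] := by simpa using congrArg List.reverse hrev
        subst this
        simp [pvJ, pvSplit, pvCollapse, PySem.Chars.join_nil]
      | cons a z =>
        have ha : a ≠ '_' := by
          intro hx
          apply hl
          rw [← List.head?_reverse, hrev, hx]
          rfl
        rw [List.dropWhile_cons_of_neg (by simp [hp, ha]), ← hrev, List.reverse_reverse]
        rw [pvCollapse_eq_J y hl, if_neg hh]
        simp

theorem pvMain (m : List Char) :
    pvLoopA (PySem.Chars.stripChars m ['_']) =
      PySem.Chars.join ['_'] ((PySem.Chars.splitOn m ['_']).filter (fun t => !t.isEmpty)) := by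
  have hp : ∀ c : Char, (['_'].contains c) = true ↔ c = '_' := by
    intro c
    simp [List.contains_eq_mem]
  rw [pvLoopA_eq_collapse]
  unfold PySem.Chars.stripChars
  rw [pvRstrip_eq (List.dropWhile (fun c => ['_'].contains c) m).length _ le_rfl _ hp
    (pvHead_dropWhile m _ hp)]
  rw [pvJ_dropWhile m _ hp, pvJ, pvSplitOn_eq]

-- ===== VERDICT (by name: the statement is the Claim_ definition above) =====
theorem normalize_token_key_spec : Claim_equal_normalize_token_key := by
  intro value _
  unfold Spec_normalize_token_key normalize_token_key normalize_token_key_alt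
  apply congrArg String.ofList
  rw [PySem.List.foldl_append_singleton_eq_map, List.nil_append,
    PySem.Str.toList_stripChars, PySem.Str.toList_join]
  have h0 : List.map String.toList
      (List.map
        (fun c => if PySem.Chars.isalnum c then String.ofList [PySem.Chars.upperChar c] else "_")
        ((PySem.Str.strip value).toList)) =
      List.map (fun c => [c])
        (List.map (fun c => if PySem.Chars.isalnum c then PySem.Chars.upperChar c else '_')
          ((PySem.Str.strip value).toList)) := by
    rw [List.map_map, List.map_map]
    apply List.map_congr_left
    intro c _
    by_cases hx : PySem.Chars.isalnum c <;> simp [hx]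
  rw [h0, show ("" : String).toList = [] from rfl, show ("_" : String).toList = ['_'] from rfl,
    PySem.Chars.join_nil_singletons]
  exact pvMain _
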